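-- pv_equiv track=rewrite | github.com/Avishka0303/cdc-etl-framework | utils/task_divider.py | get_site_thread_map
-- ===== SOURCE A (Python) =====
-- def get_site_thread_map(site_list, thread_count):
--     """
--     divide and map sites to threads.
--     :param site_list:
--     :param thread_count:
--     :return: dictionary { 0:{opco1,opco2,..},1:{opco3,opco4,..},2:{opco5,opco6,..}}
--     """
--     min_site_count_per_thread = len(site_list) // thread_count
--     site_per_thread_map = {}
--
--     for thread_id in range(thread_count):
--         start_index = thread_id * min_site_count_per_thread
--         end_index = start_index + min_site_count_per_thread
--         if thread_id == thread_count - 1: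
--             end_index = len(site_list)
--         site_per_thread_map[thread_id] = site_list[start_index: end_index]
--
--     return site_per_thread_map
-- ===== SOURCE B (Python) =====
-- def get_site_thread_map(site_list, thread_count):
--     """
--     divide and map sites to threads, consume-the-list decomposition:
--     each of the first thread_count-1 buckets takes the next q sites off the
--     front of the sequence; the last bucket takes whatever remains.
--     """
--     min_site_count_per_thread = len(site_list) // thread_count
--     rest = iter(site_list)
--     site_per_thread_map = {
--         thread_id: [site for _, site in zip(range(min_site_count_per_thread), rest)]
--         for thread_id in range(thread_count - 1)
--     }
--     site_per_thread_map[thread_count - 1] = list(rest)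
--     return site_per_thread_map
-- ===== Notes on version B (the rewrite author's own statement) =====
-- stated objective: alternative
-- what changed: B consumes the list with take/drop chunks in a single running 'rest' (last bucket assigned after the loop) instead of A's per-thread start/end index arithmetic with a special case inside the loop.
-- outside the precondition, e.g. on get_site_thread_map(['a'], -1): A returns {}, B returns {-2: ['a']}
import Mathlib
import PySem

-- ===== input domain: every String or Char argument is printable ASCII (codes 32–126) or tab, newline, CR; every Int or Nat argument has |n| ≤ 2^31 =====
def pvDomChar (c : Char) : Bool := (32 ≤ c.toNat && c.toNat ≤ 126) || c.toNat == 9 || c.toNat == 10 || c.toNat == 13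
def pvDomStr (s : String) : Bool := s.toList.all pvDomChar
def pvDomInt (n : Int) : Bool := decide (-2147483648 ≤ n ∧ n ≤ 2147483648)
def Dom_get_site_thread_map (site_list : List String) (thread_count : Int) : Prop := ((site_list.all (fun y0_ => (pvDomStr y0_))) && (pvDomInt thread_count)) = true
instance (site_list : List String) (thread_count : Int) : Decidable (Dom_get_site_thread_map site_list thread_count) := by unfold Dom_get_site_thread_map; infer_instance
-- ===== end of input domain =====

-- One line: B chunks the list with take/drop on a running remainder instead of A's index arithmetic; same cost, different decomposition.

-- ===== PORT A =====
def get_site_thread_map (site_list : List String) (thread_count : Int) : List (Int × List String) :=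
  let min_site_count_per_thread := PySem.Int.floordiv (PySem.List.len site_list) thread_count
  let site_per_thread_map : PySem.Dict Int (List String) :=
    (PySem.List.pyRange 0 thread_count 1).foldl
      (fun d thread_id =>
        let start_index := thread_id * min_site_count_per_thread
        let end_index := start_index + min_site_count_per_thread
        let end_index := if thread_id == thread_count - 1 then PySem.List.len site_list else end_index
        d.insert thread_id (PySem.List.slice site_list (some start_index) (some end_index)))
      PySem.Dict.empty
  site_per_thread_map.items

-- ===== PORT B =====
def get_site_thread_map_alt (site_list : List String) (thread_count : Int) : List (Int × List String) :=
  let min_site_count_per_thread := PySem.Int.floordiv (PySem.List.len site_list) thread_count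
  let st : PySem.Dict Int (List String) × List String :=
    (PySem.List.pyRange 0 (thread_count - 1) 1).foldl
      (fun p thread_id =>
        (p.1.insert thread_id (PySem.List.slice p.2 none (some min_site_count_per_thread)),
         PySem.List.slice p.2 (some min_site_count_per_thread) none))
      (PySem.Dict.empty, site_list)
  (st.1.insert (thread_count - 1) st.2).items

-- ===== PRECONDITION & SPEC =====
-- Pre_ excludes non-positive thread_count, outside the natural domain: at 0 A raises
-- ZeroDivisionError, and for negative counts A's empty result (range() is empty) is an accident.
def Pre_get_site_thread_map (site_list : List String) (thread_count : Int) : Prop := 1 ≤ thread_count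
instance (site_list : List String) (thread_count : Int) : Decidable (Pre_get_site_thread_map site_list thread_count) := by unfold Pre_get_site_thread_map; infer_instance
def pvWitness_get_site_thread_map : List String × Int := (["a", "b", "c"], 2)
def Spec_get_site_thread_map (site_list : List String) (thread_count : Int) (out : List (Int × List String)) : Prop := out = get_site_thread_map_alt site_list thread_count
instance (site_list : List String) (thread_count : Int) (out : List (Int × List String)) : Decidable (Spec_get_site_thread_map site_list thread_count out) := by unfold Spec_get_site_thread_map; infer_instance

-- ===== CLAIM (what is proved, stated in full; the proofs are below) =====
def Claim_equal_get_site_thread_map : Prop := ∀ (site_list : List String) (thread_count : Int), Dom_get_site_thread_map site_list thread_count → Pre_get_site_thread_map site_list thread_count → Spec_get_site_thread_map site_list thread_count (get_site_thread_map site_list thread_count)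

-- ===== LEMMAS AND PROOFS =====

-- B's pair fold: after m steps starting at key a, the dict has received the m chunks and
-- the remainder of the list is the corresponding drop.
theorem pvB_fold (qn : Nat) (m : Nat) :
    ∀ (a : Int) (d : PySem.Dict Int (List String)) (l : List String),
    (PySem.List.pyRange a (a + m) 1).foldl
      (fun p thread_id =>
        (p.1.insert thread_id (p.2.take qn), p.2.drop qn)) (d, l)
    = ((List.range m).foldl
        (fun d' j => d'.insert (a + j) ((l.drop (j * qn)).take qn)) d,
       l.drop (m * qn)) := by
  induction m with
  | zero => intro a d l; simp [PySem.List.pyRange_one_eq_nil]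
  | succ m ih =>
    intro a d l
    rw [PySem.List.pyRange_one_cons (by omega : a < a + (m + 1 : Nat))]
    simp only [List.foldl_cons]
    rw [show (a + ((m + 1 : Nat) : Int)) = (a + 1) + (m : Int) by push_cast; ring]
    rw [ih (a + 1) _ _]
    rw [List.range_succ_eq_map, List.foldl_cons, List.foldl_map]
    simp only [Prod.mk.injEq]
    refine ⟨?_, ?_⟩
    · congr 1
      · funext d' j
        have h1 : (a + 1) + (j : Int) = a + ((j.succ : Nat) : Int) := by push_cast; ring
        have h2 : (((l.drop qn).drop (j * qn)).take qn)
            = (l.drop (j.succ * qn)).take qn := by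
          rw [List.drop_drop, Nat.succ_mul]
          congr 2
          ring
        rw [h1, h2]
      · have h3 : (0 * qn : Nat) = 0 := by ring
        simp [h3]
    · rw [List.drop_drop]
      congr 1
      ring

-- ===== VERDICT (by name: the statement is the Claim_ definition above) =====
theorem get_site_thread_map_spec : Claim_equal_get_site_thread_map := by
  intro site_list tc _ hpre
  unfold Pre_get_site_thread_map at hpre
  unfold Spec_get_site_thread_map
  simp only [get_site_thread_map, get_site_thread_map_alt, PySem.List.len_eq]
  set n : Int := (site_list.length : Int) with hn
  set q : Int := PySem.Int.floordiv n tc with hqdef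
  have hq0 : 0 ≤ q := by
    rw [hqdef, PySem.Int.floordiv_eq_ediv_of_pos (by omega)]
    exact Int.ediv_nonneg (by positivity) (by omega)
  obtain ⟨qn, hq⟩ : ∃ qn : Nat, q = (qn : Int) := ⟨q.toNat, by omega⟩
  obtain ⟨m, hm⟩ : ∃ m : Nat, tc = (m : Int) + 1 := ⟨(tc - 1).toNat, by omega⟩
  -- the quotient fits: m * qn ≤ n
  have hfit : (m : Int) * qn ≤ n := by
    have h1 := PySem.Int.floordiv_mul_add_mod n tc
    have hmod : 0 ≤ PySem.Int.mod n tc := by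
      rw [PySem.Int.mod_eq_emod_of_pos (by omega)]
      exact Int.emod_nonneg n (by omega)
    rw [← hqdef] at h1
    nlinarith [hq, hm]
  rw [hq, hm]
  rw [show ((m : Int) + 1 - 1) = ((m : Nat) : Int) + 0 by ring]
  simp only [PySem.List.slice_to_natCast, PySem.List.slice_from_natCast]
  rw [show ((m : Nat) : Int) + 0 = (0 : Int) + (m : Nat) by ring]
  rw [pvB_fold qn m 0 PySem.Dict.empty site_list]
  -- A side: the loop inserts fresh distinct keys into the empty dict, so items append
  rw [PySem.Dict.items_foldl_insert_fresh
        (PySem.List.pyRange 0 ((m : Int) + 1) 1)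
        (fun t : Int => t)
        (fun t : Int => PySem.List.slice site_list (some (t * (qn : Int)))
          (some (if (t == (0 : Int) + (m : Nat)) = true then n else t * (qn : Int) + (qn : Int))))
        PySem.Dict.empty
        (fun a _ => PySem.Dict.contains_empty a)
        (by simpa using PySem.List.nodup_pyRange_one 0 ((m : Int) + 1))]
  -- B side: final key m is fresh over the fold of keys 0..m-1
  rw [PySem.Dict.items_insert_of_not_contains _ _ (by
    rw [PySem.Dict.contains_eq_decide_mem_keys, decide_eq_false_iff_not,
        PySem.Dict.keys_foldl_insert_key]
    rw [PySem.Set.mem_update]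
    rintro (h | h)
    · rw [PySem.Dict.keys_empty] at h
      simp at h
    · simp only [List.mem_map, List.mem_range] at h
      obtain ⟨j, hj, hje⟩ := h
      have : (j : Int) = (m : Int) := by omega
      omega)]
  rw [PySem.Dict.items_foldl_insert_fresh
        (List.range m)
        (fun j : Nat => (0 : Int) + (j : Int))
        (fun j : Nat => (site_list.drop (j * qn)).take qn)
        PySem.Dict.empty
        (fun a _ => PySem.Dict.contains_empty _)
        (by
          rw [List.nodup_iff_injective_getElem]
          intro i j h
          simp only [List.getElem_map, List.getElem_range] at h
          exact Fin.ext (by omega))]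
  -- both items lists are now explicit maps; compare elementwise
  rw [PySem.List.pyRange_one]
  rw [show ((m : Int) + 1 - 0).toNat = m + 1 by omega]
  rw [List.range_succ, List.map_append, List.map_append]
  simp only [List.map_map, List.map_cons, List.map_nil]
  rw [← List.append_assoc]
  congr 1
  · -- the first m buckets: slice [t*q : t*q+q] = take q (drop (t*q))
    congr 1
    apply List.map_congr_left
    intro j hj
    rw [List.mem_range] at hj
    have hne : (((0 : Int) + (j : Int)) == (0 : Int) + (m : Nat)) = false := by
      simp only [beq_eq_false_iff_ne, ne_eq]
      intro h
      omega
    simp only [Function.comp_apply, hne, Bool.false_eq_true, if_false, Prod.mk.injEq]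
    refine ⟨trivial, ?_⟩
    rw [show (((0 : Int) + (j : Int)) * (qn : Int)) = ((j * qn : Nat) : Int) by push_cast; ring,
        show (((j * qn : Nat) : Int) + (qn : Int)) = ((j * qn + qn : Nat) : Int) by push_cast; ring,
        PySem.List.slice_natCast]
    congr 1
    omega
  · -- the last bucket: slice [m*q : n] = drop (m*q)
    have heq : (((0 : Int) + ((m : Nat) : Int)) == (0 : Int) + ((m : Nat) : Int)) = true := by simp
    simp only [heq, if_true, List.cons.injEq, Prod.mk.injEq, true_and, and_true]
    rw [show (((0 : Int) + ((m : Nat) : Int)) * (qn : Int)) = ((m * qn : Nat) : Int) by push_cast; ring,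
        hn, show ((site_list.length : Int)) = ((site_list.length : Nat) : Int) from rfl,
        PySem.List.slice_natCast]
    apply List.take_of_length_le
    simp
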